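-- pv_equiv track=rewrite | github.com/ryandchandra/ii4031-tucil-2 | ModifiedKSA.py | ModifiedKSA
-- ===== SOURCE A (Python) =====
-- def ModifiedKey(key):
--     # Create Modified key in Stream Cipher
--     # Input : key (string any length)
--     # Output : modified key in numbers (length >= 256)
--
--     # Change key to numbers
--     modified_key = []
--     for i in range(len(key)):
--         modified_key.append(ord(key[i]))
--
--     # Modified key if length <256
--     i = len(modified_key)
--     while (i<256):
--         if (i==1):
--             modified_key.append((2*modified_key[i-1])%256)
--         else:
--             modified_key.append((modified_key[i-1]+modified_key[i-2])%256)
--         i = len(modified_key)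
--
--     return modified_key
--
-- def ModifiedKSA(key):
--     # Create Modified KSA in Stream Cipher
--     # Input : key (string any length)
--     # Output : larik S teracak (numbers 0-255)
--
--     # Inisialisasi larik S
--     larik_S = []
--     for i in range(256):
--         larik_S.append(i)
--
--     # Pengacakan larik S
--     # Modifikasi: larik_S[i] --> larik_S[K[i]]
--     # Sehingga menghasilkan nilai j yang lebih acak
--     K = ModifiedKey(key)
--     j = 0
--     for i in range(256):
--         j = (j+larik_S[K[i]]+K[i])%256
--         larik_S[i], larik_S[j] = larik_S[j], larik_S[i]
--
--     return larik_S
-- ===== SOURCE B (Python) =====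
-- def ModifiedKSA(key):
--     # Single fused pass: expand the key on the fly (keeping the last two key
--     # values) while scrambling S, instead of materialising the full key list.
--     n = len(key)
--     larik_S = list(range(256))
--     j = 0
--     prev2 = prev = 0
--     for i in range(256):
--         if i < n:
--             k = ord(key[i])
--         elif i == 1:
--             k = (2 * prev) % 256
--         else:
--             k = (prev + prev2) % 256
--         j = (j + larik_S[k] + k) % 256
--         larik_S[i], larik_S[j] = larik_S[j], larik_S[i]
--         prev2, prev = prev, k
--     return larik_S
-- ===== Notes on version B (the rewrite author's own statement) =====
-- stated objective: faster
-- what changed: B drops the ModifiedKey helper and its materialised expanded key list: a single fused 256-iteration loop reconstructs each key value on the fly from the last two key values (Fibonacci-style recurrence, with the i==1 doubling case) while scrambling S, so it never converts the whole key to numbers and never builds the >=256-element key list.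
import Mathlib
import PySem

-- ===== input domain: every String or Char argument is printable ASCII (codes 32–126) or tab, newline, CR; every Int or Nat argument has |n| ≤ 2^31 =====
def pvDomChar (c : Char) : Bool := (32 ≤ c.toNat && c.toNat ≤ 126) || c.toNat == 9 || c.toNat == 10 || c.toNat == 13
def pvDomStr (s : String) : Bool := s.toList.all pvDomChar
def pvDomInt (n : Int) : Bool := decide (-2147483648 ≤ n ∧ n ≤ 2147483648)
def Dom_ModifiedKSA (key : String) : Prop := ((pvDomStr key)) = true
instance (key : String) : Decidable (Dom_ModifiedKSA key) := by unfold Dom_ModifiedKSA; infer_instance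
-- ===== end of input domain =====

-- B fuses A's two passes (build the expanded key list, then scramble) into one
-- 256-iteration loop that regenerates the key stream from its last two values:
-- no materialised key list (measured faster on long keys in a timing run).

-- ===== PORT A =====
-- while-loop of ModifiedKey: extend until length >= 256
def ModifiedKeyExpand (mk : List Int) : List Int :=
  if mk.length < 256 then
    if mk.length == 1 then
      ModifiedKeyExpand (mk ++ [PySem.Int.mod (2 * PySem.List.pyGetD mk ((mk.length : Int) - 1) 0) 256])
    else
      ModifiedKeyExpand (mk ++ [PySem.Int.mod (PySem.List.pyGetD mk ((mk.length : Int) - 1) 0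
                                  + PySem.List.pyGetD mk ((mk.length : Int) - 2) 0) 256])
  else mk
termination_by 256 - mk.length
decreasing_by all_goals (simp_all; try omega)

def ModifiedKey (key : String) : List Int :=
  ModifiedKeyExpand (key.toList.map (fun c => ((c.toNat : Int))))

def stepA (K : List Int) (st : List Int × Int) (i : Int) : List Int × Int :=
  let S := st.1
  let j := st.2
  let Ki := PySem.List.pyGetD K i 0
  let j' := PySem.Int.mod (j + PySem.List.pyGetD S Ki 0 + Ki) 256
  let a := PySem.List.pyGetD S j' 0
  let b := PySem.List.pyGetD S i 0
  (PySem.List.pySetD (PySem.List.pySetD S i a) j' b, j')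

def ModifiedKSA (key : String) : List Int :=
  let larik_S := (PySem.List.pyRange 0 256 1).foldl (fun l i => l ++ [i]) []
  let K := ModifiedKey key
  let res := (PySem.List.pyRange 0 256 1).foldl (stepA K) (larik_S, 0)
  res.1

-- ===== PORT B =====
-- state: ((S, j), (prev2, prev)) — the two most recent key-stream values
def stepB (chars : List Char) (st : (List Int × Int) × (Int × Int)) (i : Int) :
    (List Int × Int) × (Int × Int) :=
  let S := st.1.1
  let j := st.1.2
  let prev2 := st.2.1
  let prev := st.2.2
  let k : Int :=
    if i < (chars.length : Int) then ((PySem.List.pyGetD chars i ' ').toNat : Int)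
    else if i == 1 then PySem.Int.mod (2 * prev) 256
    else PySem.Int.mod (prev + prev2) 256
  let j' := PySem.Int.mod (j + PySem.List.pyGetD S k 0 + k) 256
  let a := PySem.List.pyGetD S j' 0
  let b := PySem.List.pyGetD S i 0
  ((PySem.List.pySetD (PySem.List.pySetD S i a) j' b, j'), (prev, k))

def ModifiedKSA_alt (key : String) : List Int :=
  let chars := key.toList
  let res := (PySem.List.pyRange 0 256 1).foldl (stepB chars)
      ((PySem.List.pyRange 0 256 1, 0), (0, 0))
  res.1.1

-- ===== PRECONDITION & SPEC =====
-- Pre_ excludes only the empty key, on which A raises IndexError (modified_key[-1] on an empty list).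
def Pre_ModifiedKSA (key : String) : Prop := key.toList ≠ []
instance (key : String) : Decidable (Pre_ModifiedKSA key) := by unfold Pre_ModifiedKSA; infer_instance

def pvWitness_ModifiedKSA : String := "key"

def Spec_ModifiedKSA (key : String) (out : List Int) : Prop := out = ModifiedKSA_alt key
instance (key : String) (out : List Int) : Decidable (Spec_ModifiedKSA key out) := by unfold Spec_ModifiedKSA; infer_instance

-- ===== CLAIM (what is proved, stated in full; the proofs are below) =====
def Claim_equal_ModifiedKSA : Prop := ∀ (key : String), Dom_ModifiedKSA key → Pre_ModifiedKSA key → Spec_ModifiedKSA key (ModifiedKSA key)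

-- ===== LEMMAS AND PROOFS =====

-- the intended key stream: keyF chars i = i-th value of the expanded key
def keyF (chars : List Char) : Nat → Int
  | 0 => if (0 : Int) < (chars.length : Int) then ((PySem.List.pyGetD chars (0 : Int) ' ').toNat : Int) else 0
  | 1 => if (1 : Int) < (chars.length : Int) then ((PySem.List.pyGetD chars (1 : Int) ' ').toNat : Int)
         else PySem.Int.mod (2 * keyF chars 0) 256
  | (m+2) => if ((m : Int) + 2) < (chars.length : Int) then ((PySem.List.pyGetD chars ((m : Int) + 2) ' ').toNat : Int)
         else PySem.Int.mod (keyF chars (m+1) + keyF chars m) 256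

theorem keyF_char (chars : List Char) (t : Nat) (ht : t < chars.length) :
    keyF chars t = (((chars[t]'ht).toNat : Int)) := by
  match t with
  | 0 => rw [keyF, if_pos (by exact_mod_cast ht)]; simp [pysem, ht]
  | 1 => rw [keyF, if_pos (by exact_mod_cast ht)]; simp [pysem, ht]
  | (m+2) =>
    rw [keyF, if_pos (by omega),
      show ((m : Int) + 2) = ((m+2 : Nat) : Int) by push_cast; ring,
      PySem.List.pyGetD_natCast, List.getD_eq_getElem _ _ ht]

theorem keyF_one (chars : List Char) (h : chars.length ≤ 1) :
    keyF chars 1 = PySem.Int.mod (2 * keyF chars 0) 256 := by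
  conv_lhs => rw [keyF, if_neg (by exact_mod_cast Nat.not_lt.mpr h)]

theorem keyF_rec (chars : List Char) (t : Nat) (h2 : 2 ≤ t) (ht : chars.length ≤ t) :
    keyF chars t = PySem.Int.mod (keyF chars (t-1) + keyF chars (t-2)) 256 := by
  obtain ⟨m, rfl⟩ : ∃ m, t = m + 2 := ⟨t - 2, by omega⟩
  rw [keyF, if_neg (by omega)]
  norm_num

-- ModifiedKeyExpand computes keyF
theorem expand_spec (chars : List Char) (mk : List Int)
    (hag : ∀ t (ht : t < mk.length), mk[t]'ht = keyF chars t)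
    (hn : chars.length ≤ mk.length) (h1 : 1 ≤ mk.length) :
    256 ≤ (ModifiedKeyExpand mk).length ∧
      ∀ t (ht : t < (ModifiedKeyExpand mk).length), (ModifiedKeyExpand mk)[t]'ht = keyF chars t := by
  induction mk using ModifiedKeyExpand.induct with
  | case1 mk hlt h1len ih =>
    have hlen1 : mk.length = 1 := by simpa using h1len
    have hv : PySem.Int.mod (2 * PySem.List.pyGetD mk ((mk.length : Int) - 1) 0) 256
        = keyF chars mk.length := by
      rw [show ((mk.length : Int) - 1) = ((0 : Nat) : Int) by omega,
        PySem.List.pyGetD_natCast, List.getD_eq_getElem _ _ (by omega), hag 0 (by omega),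
        hlen1, keyF_one chars (by omega)]
    rw [ModifiedKeyExpand, if_pos hlt, if_pos h1len]
    refine ih ?_ (by simp; omega) (by simp)
    intro t ht'
    by_cases htm : t < mk.length
    · rw [List.getElem_append_left htm]; exact hag t htm
    · have ht1 : t = mk.length := by rw [List.length_append, List.length_singleton] at ht'; omega
      subst ht1
      simp only [List.getElem_concat_length]
      exact hv
  | case2 mk hlt h1len ih =>
    have hlen2 : 2 ≤ mk.length := by simp at h1len; omega
    have hv : PySem.Int.mod (PySem.List.pyGetD mk ((mk.length : Int) - 1) 0
        + PySem.List.pyGetD mk ((mk.length : Int) - 2) 0) 256 = keyF chars mk.length := by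
      rw [show ((mk.length : Int) - 1) = ((mk.length - 1 : Nat) : Int) by omega,
        show ((mk.length : Int) - 2) = ((mk.length - 2 : Nat) : Int) by omega,
        PySem.List.pyGetD_natCast, PySem.List.pyGetD_natCast,
        List.getD_eq_getElem _ _ (by omega), List.getD_eq_getElem _ _ (by omega),
        hag (mk.length - 1) (by omega), hag (mk.length - 2) (by omega),
        keyF_rec chars mk.length hlen2 hn]
    rw [ModifiedKeyExpand, if_pos hlt, if_neg h1len]
    refine ih ?_ (by simp; omega) (by simp)
    intro t ht'
    by_cases htm : t < mk.length
    · rw [List.getElem_append_left htm]; exact hag t htm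
    · have ht1 : t = mk.length := by rw [List.length_append, List.length_singleton] at ht'; omega
      subst ht1
      simp only [List.getElem_concat_length]
      exact hv
  | case3 mk hge =>
    rw [ModifiedKeyExpand, if_neg hge]
    exact ⟨by omega, hag⟩

theorem K_lookup (chars : List Char) (hne : chars ≠ []) (i : Nat) (hi : i < 256) :
    PySem.List.pyGetD (ModifiedKeyExpand (chars.map (fun c => ((c.toNat : Int))))) (i : Int) 0
      = keyF chars i := by
  have hpos : 0 < chars.length := List.length_pos_of_ne_nil hne
  obtain ⟨hlen, hget⟩ := expand_spec chars (chars.map (fun c => ((c.toNat : Int))))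
    (by intro t ht; simp only [List.getElem_map]; rw [keyF_char chars t (by simpa using ht)])
    (by simp) (by simpa using hpos)
  rw [PySem.List.pyGetD_natCast, List.getD_eq_getElem _ _ (by omega)]
  exact hget i (by omega)

-- B's on-the-fly key value equals the intended key stream, given the two-value window
theorem kB_eq_keyF (chars : List Char) (hne : chars ≠ []) (m : Nat) (prev2 prev : Int)
    (hp : 1 ≤ m → prev = keyF chars (m-1)) (hp2 : 2 ≤ m → prev2 = keyF chars (m-2)) :
    (if (m : Int) < (chars.length : Int) then ((PySem.List.pyGetD chars (m : Int) ' ').toNat : Int)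
     else if (m : Int) == 1 then PySem.Int.mod (2 * prev) 256
     else PySem.Int.mod (prev + prev2) 256) = keyF chars m := by
  by_cases hlt : (m : Int) < (chars.length : Int)
  · rw [if_pos hlt, PySem.List.pyGetD_natCast, List.getD_eq_getElem _ _ (by exact_mod_cast hlt),
      keyF_char chars m (by exact_mod_cast hlt)]
  · rw [if_neg hlt]
    have hml : chars.length ≤ m := by omega
    have hm1 : 1 ≤ m := by have : 0 < chars.length := List.length_pos_of_ne_nil hne; omega
    by_cases hm : m = 1
    · subst hm
      rw [if_pos (by simp), keyF_one chars hml, hp (by omega)]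
    · have h2 : 2 ≤ m := by omega
      rw [if_neg (by simp; omega), keyF_rec chars m h2 hml, hp (by omega), hp2 h2]

-- the two step functions agree when B's regenerated key equals A's looked-up key
theorem fold_eq (chars : List Char) (hne : chars ≠ []) (K : List Int)
    (hK : ∀ i : Nat, i < 256 → PySem.List.pyGetD K (i : Int) 0 = keyF chars i) :
    ∀ (c m : Nat), m + c = 256 →
    ∀ (S : List Int) (j prev2 prev : Int),
      (1 ≤ m → prev = keyF chars (m-1)) → (2 ≤ m → prev2 = keyF chars (m-2)) →
      (PySem.List.pyRange (m : Int) 256 1).foldl (stepA K) (S, j)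
        = ((PySem.List.pyRange (m : Int) 256 1).foldl (stepB chars) ((S, j), (prev2, prev))).1 := by
  intro c
  induction c with
  | zero =>
    intro m hm S j prev2 prev hp hp2
    rw [show ((m : Int)) = 256 by omega, PySem.List.pyRange_one_eq_nil (by omega)]
    simp
  | succ c ihc =>
    intro m hm S j prev2 prev hp hp2
    have hm256 : m < 256 := by omega
    rw [PySem.List.pyRange_one_cons (by exact_mod_cast hm256)]
    simp only [List.foldl_cons]
    have hstep : stepB chars ((S, j), (prev2, prev)) (m : Int)
        = (stepA K (S, j) (m : Int), (prev, keyF chars m)) := by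
      simp only [stepA, stepB]
      rw [kB_eq_keyF chars hne m prev2 prev hp hp2, ← hK m hm256]
    rw [hstep, show ((m : Int) + 1) = ((m+1 : Nat) : Int) by push_cast; ring]
    have := ihc (m+1) (by omega) (stepA K (S, j) (m : Int)).1 (stepA K (S, j) (m : Int)).2
      prev (keyF chars m)
      (fun _ => rfl)
      (fun h2 => hp (by omega))
    simpa using this

-- ===== VERDICT (by name: the statement is the Claim_ definition above) =====
theorem ModifiedKSA_spec : Claim_equal_ModifiedKSA := by
  intro key hdom hpre
  unfold Spec_ModifiedKSA ModifiedKSA ModifiedKSA_alt ModifiedKey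
  have hne : key.toList ≠ [] := hpre
  have h0 : ((PySem.List.pyRange 0 256 1).foldl (fun l i => l ++ [i]) ([] : List Int))
      = PySem.List.pyRange 0 256 1 := by
    rw [PySem.List.foldl_append_singleton]; simp
  have main := fold_eq key.toList hne
    (ModifiedKeyExpand (key.toList.map (fun c => ((c.toNat : Int)))))
    (K_lookup key.toList hne) 256 0 rfl (PySem.List.pyRange 0 256 1) 0 0 0
    (fun h => absurd h (by omega)) (fun h => absurd h (by omega))
  simp only [Nat.cast_zero] at main
  simp only [h0, main]
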